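-- pv_equiv track=rewrite | github.com/FatKidddd/statarb | convert_to_ipynb.py | split_script_into_cells
-- ===== SOURCE A (Python) =====
-- def split_script_into_cells(script):
--     cells = []
--     lines = script.split('\n')
--     cell = []
--     for line in lines:
--         if line.strip().startswith("#cell"):
--             if cell:
--                 cells.append(cell)
--             cell = []
--         else:
--             cell.append(line)
--     if cell:
--         cells.append(cell)
--     return cells
-- ===== SOURCE B (Python) =====
-- def split_script_into_cells(script):
--     def is_marker(line):
--         return line.strip().startswith("#cell")
--
--     def go(lines):
--         # recursively peel off the maximal run of non-marker lines
--         if not lines: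
--             return []
--         if is_marker(lines[0]):
--             return go(lines[1:])
--         j = 1
--         while j < len(lines) and not is_marker(lines[j]):
--             j += 1
--         return [lines[:j]] + go(lines[j:])
--
--     return go(script.split('\n'))
-- ===== Notes on version B (the rewrite author's own statement) =====
-- stated objective: alternative
-- what changed: Replaces A's accumulator-and-flush loop with a recursive decomposition that peels off each maximal run of consecutive non-marker lines as one cell.
import Mathlib
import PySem

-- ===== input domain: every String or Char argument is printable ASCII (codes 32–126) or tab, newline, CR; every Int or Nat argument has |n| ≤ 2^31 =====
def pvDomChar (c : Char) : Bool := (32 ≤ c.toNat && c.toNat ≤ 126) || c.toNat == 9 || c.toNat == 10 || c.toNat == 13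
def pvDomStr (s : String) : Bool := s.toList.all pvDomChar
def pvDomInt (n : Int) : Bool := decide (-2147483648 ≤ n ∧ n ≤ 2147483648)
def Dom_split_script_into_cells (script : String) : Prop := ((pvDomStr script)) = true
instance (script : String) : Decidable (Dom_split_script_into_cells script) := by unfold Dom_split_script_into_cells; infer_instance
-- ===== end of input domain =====

-- B replaces A's accumulator-and-flush loop by a recursion that peels off each
-- maximal run of consecutive non-marker lines as one cell (objective: alternative).

-- line.strip().startswith("#cell")
def pvIsMarker (line : String) : Bool :=
  PySem.Str.startswith (PySem.Str.strip line) "#cell"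

-- ===== PORT A =====
-- the body of A's for-loop, acting on the state (cells, cell)
def pvStepA (st : List (List String) × List String) (line : String) :
    List (List String) × List String :=
  if pvIsMarker line then
    (if st.2 ≠ [] then (st.1 ++ [st.2], ([] : List String)) else (st.1, []))
  else (st.1, st.2 ++ [line])

-- the trailing 'if cell: cells.append(cell)'
def pvFinishA (st : List (List String) × List String) : List (List String) :=
  if st.2 ≠ [] then st.1 ++ [st.2] else st.1

-- script.split('\n') = PySem.Str.split? with the nonempty separator "\n" (always some)
def split_script_into_cells (script : String) : List (List String) :=
  pvFinishA (((PySem.Str.split? script "\n").getD []).foldl pvStepA ([], []))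

-- ===== PORT B =====
-- the j-scan of Source B computes the maximal non-marker run: lines[:j] / lines[j:]
-- are exactly 'first line :: takeWhile (not marker)' / 'dropWhile (not marker)'
def pvGo : List String → List (List String)
  | [] => []
  | l :: ls =>
    if pvIsMarker l then pvGo ls
    else (l :: ls.takeWhile (fun x => !pvIsMarker x)) :: pvGo (ls.dropWhile (fun x => !pvIsMarker x))
termination_by ls => ls.length
decreasing_by
  · simp
  · simp only [List.length_cons]
    exact Nat.lt_succ_of_le (List.length_dropWhile_le _ _)

def split_script_into_cells_alt (script : String) : List (List String) :=
  pvGo ((PySem.Str.split? script "\n").getD [])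

-- ===== PRECONDITION & SPEC =====
def Spec_split_script_into_cells (script : String) (out : List (List String)) : Prop := out = split_script_into_cells_alt script
instance (script : String) (out : List (List String)) : Decidable (Spec_split_script_into_cells script out) := by unfold Spec_split_script_into_cells; infer_instance

-- ===== CLAIM (what is proved, stated in full; the proofs are below) =====
def Claim_equal_split_script_into_cells : Prop := ∀ (script : String), Dom_split_script_into_cells script → Spec_split_script_into_cells script (split_script_into_cells script)

-- ===== LEMMAS AND PROOFS =====

-- A's loop continued from a partial cell, as a recursion (intermediate form)
def pvGo' (cell : List String) : List String → List (List String)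
  | [] => if cell ≠ [] then [cell] else []
  | l :: ls =>
    if pvIsMarker l then
      (if cell ≠ [] then cell :: pvGo' [] ls else pvGo' [] ls)
    else pvGo' (cell ++ [l]) ls

lemma pvA_fold_eq_go' (lines : List String) :
    ∀ (cells : List (List String)) (cell : List String),
      pvFinishA (lines.foldl pvStepA (cells, cell)) = cells ++ pvGo' cell lines := by
  induction lines with
  | nil =>
    intro cells cell
    simp only [List.foldl_nil, pvGo', pvFinishA]
    split_ifs <;> simp_all
  | cons l ls ih =>
    intro cells cell
    simp only [List.foldl_cons, pvGo', pvStepA]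
    by_cases hm : pvIsMarker l
    · by_cases hc : cell = []
      · simp only [hm, hc, if_true, ne_eq, not_true_eq_false, if_false, ite_self]
        exact ih cells []
      · simp only [hm, hc, if_true, ne_eq, not_false_eq_true, if_true]
        rw [ih (cells ++ [cell]) []]
        simp [List.append_assoc]
    · simp only [hm, if_false]
      exact ih cells (cell ++ [l])

lemma go'_eq_go (lines : List String) :
    ∀ (cell : List String),
      pvGo' cell lines =
        if cell = [] then pvGo lines
        else (cell ++ lines.takeWhile (fun x => !pvIsMarker x)) :: pvGo (lines.dropWhile (fun x => !pvIsMarker x)) := by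
  induction lines with
  | nil =>
    intro cell
    by_cases hc : cell = [] <;> simp [pvGo', pvGo, hc]
  | cons l ls ih =>
    intro cell
    by_cases hm : pvIsMarker l
    · have h0 : pvGo' ([] : List String) ls = pvGo ls := by simpa using ih []
      by_cases hc : cell = []
      · simp [pvGo', pvGo, hm, hc, h0]
      · simp [pvGo', pvGo, hm, hc, h0, List.takeWhile, List.dropWhile]
    · have h1 := ih (cell ++ [l])
      by_cases hc : cell = []
      · subst hc
        simp only [pvGo', hm, if_false]
        rw [h1]
        simp [pvGo, hm, List.takeWhile, List.dropWhile]
      · simp only [pvGo', hm, if_false]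
        rw [h1]
        simp [hc, List.takeWhile, List.dropWhile, hm]

-- ===== VERDICT (by name: the statement is the Claim_ definition above) =====
theorem split_script_into_cells_spec : Claim_equal_split_script_into_cells := by
  intro script _
  unfold Spec_split_script_into_cells split_script_into_cells split_script_into_cells_alt
  have h := pvA_fold_eq_go' ((PySem.Str.split? script "\n").getD []) [] []
  have h2 := go'_eq_go ((PySem.Str.split? script "\n").getD []) []
  simp only [if_pos rfl] at h2
  simpa [h2] using h
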